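-- pv_equiv track=rewrite | github.com/daniel-reich/turbo-robot | cBPj6yfALGfmeZQLG_22.py | vertical_txt
-- ===== SOURCE A (Python) =====
-- def vertical_txt(txt):
--   strings = txt.split()
--   biggest = 0
--   vertical = []
--   for word in strings:
--     if len(word) > biggest:
--       biggest = len(word)
--   for i in range(1, biggest + 1):
--     vertical.append([])
--   for i in range(1, biggest + 1):
--     for each in strings:
--       if len(each) < i:
--         vertical[i - 1].append(" ")
--       else:
--         vertical[i - 1].append(each[i - 1])
--   return vertical
-- ===== SOURCE B (Python) =====
-- def vertical_txt(txt):
--     words = txt.split()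
--     biggest = max((len(w) for w in words), default=0)
--     padded = [w.ljust(biggest) for w in words]
--     return [list(col) for col in zip(*padded)]
-- ===== Notes on version B (the rewrite author's own statement) =====
-- stated objective: simpler
-- what changed: Replaces the cell-by-cell grid filling (preallocate rows, then nested loops deciding char-vs-space per cell with indexed appends) by pad-then-transpose: ljust every word to the maximum length and transpose the rectangle with zip(*padded).
import Mathlib
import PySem

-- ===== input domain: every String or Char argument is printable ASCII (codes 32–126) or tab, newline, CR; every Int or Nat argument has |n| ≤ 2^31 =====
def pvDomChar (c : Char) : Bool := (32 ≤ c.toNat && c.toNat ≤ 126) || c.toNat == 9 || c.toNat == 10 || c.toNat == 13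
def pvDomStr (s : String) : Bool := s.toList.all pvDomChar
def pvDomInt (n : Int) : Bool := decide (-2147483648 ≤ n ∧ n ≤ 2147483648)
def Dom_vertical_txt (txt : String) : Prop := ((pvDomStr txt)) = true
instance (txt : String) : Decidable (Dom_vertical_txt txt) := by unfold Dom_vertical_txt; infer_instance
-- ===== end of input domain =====

-- B replaces A's cell-by-cell grid filling by pad-to-rectangle (ljust) then transpose; equal return value, different decomposition (objective: simpler).

-- ===== PORT A =====
def vertical_txt (txt : String) : List (List String) :=
  let strings := PySem.Str.split₀ txt
  let biggest : Int := strings.foldl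
    (fun biggest word => if PySem.Str.len word > biggest then PySem.Str.len word else biggest) 0
  let vertical : List (List String) :=
    (PySem.List.pyRange 1 (biggest + 1) 1).foldl (fun vertical _ => vertical ++ [[]]) []
  (PySem.List.pyRange 1 (biggest + 1) 1).foldl (fun vertical i =>
    strings.foldl (fun vertical each =>
      PySem.List.pySetD vertical (i - 1)
        (PySem.List.pyGetD vertical (i - 1) [] ++
          [if PySem.Str.len each < i then " "
           -- each[i-1]: in range here (the guard gives i ≤ len each), so the .getD " " default is unreachable
           else ((PySem.Str.pyGet? each (i - 1)).map fun c => String.ofList [c]).getD " "]))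
      vertical) vertical

-- ===== PORT B =====
def vertical_txt_alt (txt : String) : List (List String) :=
  let words := PySem.Str.split₀ txt
  let biggest : Int := PySem.List.maxD (words.map PySem.Str.len) id 0
  -- w.ljust(biggest): pad on the right with spaces up to biggest (no-op if already that long)
  let padded : List (List Char) :=
    words.map (fun w => w.toList ++ List.replicate (biggest.toNat - w.toList.length) ' ')
  -- zip(*padded): column j is the j-th cell of every row, j < biggest (every padded row has length biggest)
  (List.range biggest.toNat).map (fun j => padded.map (fun row => String.ofList [row.getD j ' ']))

-- ===== PRECONDITION & SPEC =====
def Spec_vertical_txt (txt : String) (out : List (List String)) : Prop := out = vertical_txt_alt txt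
instance (txt : String) (out : List (List String)) : Decidable (Spec_vertical_txt txt out) := by unfold Spec_vertical_txt; infer_instance

-- ===== CLAIM (what is proved, stated in full; the proofs are below) =====
def Claim_equal_vertical_txt : Prop := ∀ (txt : String), Dom_vertical_txt txt → Spec_vertical_txt txt (vertical_txt txt)

-- ===== LEMMAS AND PROOFS =====

-- A's running-maximum fold over the words equals B's max(..., default=0) of the lengths.
-- the A-side fold keeps its accumulator a running maximum
theorem foldl_max_shape (ws : List String) (b : Int) :
    ws.foldl (fun b w => if PySem.Str.len w > b then PySem.Str.len w else b) b
      = (ws.map PySem.Str.len).foldl max b := by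
  induction ws generalizing b with
  | nil => rfl
  | cons w ws ih =>
      simp only [List.foldl_cons, List.map_cons, ih]
      congr 1
      simp only [max_def]
      split_ifs <;> omega

theorem max?_cons (l : List Int) (m : Int) :
    PySem.List.max? (m :: l) id = some (l.foldl max m) := by
  induction l generalizing m with
  | nil => rfl
  | cons x l ih =>
      have h : PySem.List.max? (m :: x :: l) id = PySem.List.max? (max m x :: l) id := by
        unfold PySem.List.max?
        simp only [List.foldl_cons]
        congr 1
        show (if id m < id x then some x else some m) = some (max m x)
        simp only [id, max_def]
        split_ifs <;> (try rfl) <;> simp_all <;> omega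
      rw [h, ih, List.foldl_cons]

theorem biggest_eq (ws : List String) :
    ws.foldl (fun b w => if PySem.Str.len w > b then PySem.Str.len w else b) 0
      = PySem.List.maxD (ws.map PySem.Str.len) id 0 := by
  rw [foldl_max_shape]
  cases ws with
  | nil => rfl
  | cons w ws =>
      unfold PySem.List.maxD
      simp only [List.map_cons, List.foldl_cons, max?_cons, Option.getD_some]
      have h0 : max 0 (PySem.Str.len w) = PySem.Str.len w := by
        have := PySem.Str.len_eq w
        simp only [max_def]
        split_ifs <;> omega
      rw [h0]

-- A's inner loop (over the words, appending one cell to row k) in closed form.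
theorem inner_loop (ws : List String) (f : String → String) (v : List (List String)) (k : Nat)
    (hk : k < v.length) :
    ws.foldl (fun v e =>
        PySem.List.pySetD v ((k : Int) + 1 - 1)
          (PySem.List.pyGetD v ((k : Int) + 1 - 1) [] ++ [f e])) v
      = v.set k (v.getD k [] ++ ws.map f) := by
  have hcast : (k : Int) + 1 - 1 = (k : Int) := by omega
  induction ws generalizing v with
  | nil =>
      simp only [List.foldl_nil, List.map_nil, List.append_nil,
        List.getD_eq_getElem v [] hk, List.set_getElem_self]
  | cons e ws ih =>
      simp only [hcast, PySem.List.pySetD_natCast, PySem.List.pyGetD_natCast] at ih ⊢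
      simp only [List.foldl_cons]
      rw [ih _ (by simpa using hk)]
      rw [List.set_set]
      congr 1
      rw [List.getD_eq_getElem _ [] (by simpa using hk), List.getElem_set]
      simp

-- A's outer loop over range(1, N+1), each iteration rewriting row i-1, in closed form.
theorem outer_loop (c : Nat → List String) (N : Nat) (v : List (List String)) (hN : N ≤ v.length)
    (step : List (List String) → Int → List (List String))
    (hstep : ∀ (v : List (List String)) (k : Nat), k < v.length →
        step v ((k : Int) + 1) = v.set k (v.getD k [] ++ c k)) :
    (PySem.List.pyRange 1 ((N : Int) + 1) 1).foldl step v
      = v.mapIdx (fun j x => if j < N then x ++ c j else x) := by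
  induction N with
  | zero =>
      have h0 : PySem.List.pyRange 1 ((0 : Nat) + 1) 1 = [] := by decide
      rw [h0, List.foldl_nil]
      apply List.ext_getElem (by simp)
      intro j h1 h2
      simp [List.getElem_mapIdx]
  | succ N ih =>
      have hsplit : PySem.List.pyRange 1 (((N + 1 : Nat) : Int) + 1) 1
          = PySem.List.pyRange 1 ((N : Int) + 1) 1 ++ [(N : Int) + 1] := by
        have := PySem.List.pyRange_one_succ_right (a := 1) (b := (N : Int) + 1) (by omega)
        push_cast
        rw [← this]
      rw [hsplit, List.foldl_append, List.foldl_cons, List.foldl_nil,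
        ih (by omega)]
      rw [hstep _ N (by simp; omega)]
      apply List.ext_getElem (by simp)
      intro j h1 h2
      simp only [List.getElem_set, List.getElem_mapIdx]
      rcases eq_or_ne N j with h | h
      · subst h
        rw [if_pos rfl, if_pos (Nat.lt_succ_self N)]
        have hN' : N < (List.mapIdx (fun j x => if j < N then x ++ c j else x) v).length := by
          simp; omega
        rw [List.getD_eq_getElem _ [] hN']
        rw [List.getElem_mapIdx, if_neg (lt_irrefl N)]
      · rw [if_neg h]
        by_cases hj : j < N
        · rw [if_pos hj, if_pos (by omega)]
        · rw [if_neg hj, if_neg (by omega)]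

-- A's row-preallocation loop builds a list of empty rows.
theorem init_loop (l : List Int) (acc : List (List String)) :
    l.foldl (fun v _ => v ++ [[]]) acc = acc ++ List.replicate l.length ([] : List String) := by
  induction l generalizing acc with
  | nil => simp
  | cons x l ih =>
      simp only [List.foldl_cons, List.length_cons]
      rw [ih, List.append_assoc]
      rfl

theorem pyRange_one_len (N : Nat) : (PySem.List.pyRange 1 ((N : Int) + 1) 1).length = N := by
  induction N with
  | zero => decide
  | succ N ih =>
      have hsplit : PySem.List.pyRange 1 (((N + 1 : Nat) : Int) + 1) 1
          = PySem.List.pyRange 1 ((N : Int) + 1) 1 ++ [(N : Int) + 1] := by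
        have := PySem.List.pyRange_one_succ_right (a := 1) (b := (N : Int) + 1) (by omega)
        push_cast
        rw [← this]
      rw [hsplit]
      simp [ih]

theorem main_eq (txt : String) : vertical_txt txt = vertical_txt_alt txt := by
  simp only [vertical_txt, vertical_txt_alt]
  rw [biggest_eq]
  set ws := PySem.Str.split₀ txt with hws
  set M : Int := PySem.List.maxD (ws.map PySem.Str.len) id 0 with hM
  -- M is a maximum of nonnegative lengths
  have hfold : M = (ws.map PySem.Str.len).foldl max 0 := by
    rw [hM, ← biggest_eq, foldl_max_shape]
  have hnn : 0 ≤ M := by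
    rw [hfold]; exact (PySem.List.le_foldl_max (ws.map PySem.Str.len) 0).1
  have hub : ∀ w ∈ ws, PySem.Str.len w ≤ M := by
    intro w hw
    rw [hfold]
    exact (PySem.List.le_foldl_max (ws.map PySem.Str.len) 0).2 _ (List.mem_map_of_mem hw)
  set N : Nat := M.toNat with hN
  have hMN : M = (N : Int) := by rw [hN]; omega
  rw [hMN]
  have hub' : ∀ w ∈ ws, w.toList.length ≤ N := by
    intro w hw
    have := hub w hw
    rw [PySem.Str.len_eq] at this
    omega
  -- the preallocated grid is N empty rows
  rw [init_loop, List.nil_append, pyRange_one_len]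
  -- the nested filling loops, in closed form
  rw [outer_loop
    (c := fun k => ws.map (fun each =>
      if PySem.Str.len each < (k : Int) + 1 then " "
      else ((PySem.Str.pyGet? each ((k : Int) + 1 - 1)).map fun ch => String.ofList [ch]).getD " "))
    (N := N) (v := List.replicate N []) (by simp)
    (hstep := fun v k hk => inner_loop ws _ v k hk)]
  -- compare the two grids column by column
  apply List.ext_getElem (by simp)
  intro j h1 h2
  have hjN : j < N := by simpa using h1
  simp only [List.getElem_mapIdx, List.getElem_map, List.getElem_range, if_pos hjN,
    List.getElem_replicate, List.nil_append, List.map_map]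
  apply List.map_congr_left
  intro w hw
  have hcast : (j : Int) + 1 - 1 = (j : Int) := by omega
  simp only [Function.comp, hcast, PySem.Str.len_eq, PySem.Str.pyGet?_natCast]
  by_cases hj : j < w.toList.length
  · rw [if_neg (by omega), List.getElem?_eq_getElem hj]
    rw [List.getD_eq_getElem _ ' ' (by simp; omega), List.getElem_append_left hj]
    rfl
  · rw [if_pos (by omega)]
    have hL : w.toList.length ≤ N := hub' w hw
    rw [List.getD_eq_getElem _ ' ' (by simp; omega)]
    rw [List.getElem_append_right (by omega)]
    simp

-- ===== VERDICT (by name: the statement is the Claim_ definition above) =====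
theorem vertical_txt_spec : Claim_equal_vertical_txt := by
  intro txt _
  unfold Spec_vertical_txt
  exact main_eq txt
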